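-- pv_equiv track=rewrite | github.com/gibki/io2018par | par1.py | calculate_longest_subchain_length
-- ===== SOURCE A (Python) =====
-- def generate_subchains(chain, length):
--     subchain_count = len(chain) - length + 1
--     return [chain[x:x + length] for x in range(subchain_count)]
--
-- def calculate_chain_parity(chain):
--     return sum(chain) % 2
--
-- def calculate_longest_subchain_length(n, m, a, b):
--     if m > n:
--         n, m, a, b = m, n, b, a
--
--     for length in reversed(range(m + 1)):
--         for chain_a_subchain in generate_subchains(a, length):
--             for chain_b_subchain in generate_subchains(b, length):
--                 if calculate_chain_parity(chain_a_subchain) ==\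
--                    calculate_chain_parity(chain_b_subchain):
--                     return length
-- ===== SOURCE B (Python) =====
-- def calculate_longest_subchain_length(n, m, a, b):
--     # Prefix parities: parity of a[x:x+L] is (pa[x+L]-pa[x]) % 2, so per length
--     # we intersect the two achievable parity sets instead of comparing all slice pairs.
--     if m > n:
--         n, m, a, b = m, n, b, a
--     pa = [0]
--     s = 0
--     for v in a:
--         s = (s + v) % 2
--         pa.append(s)
--     pb = [0]
--     s = 0
--     for v in b:
--         s = (s + v) % 2
--         pb.append(s)
--     for length in reversed(range(m + 1)):
--         sa = {(pa[x + length] - pa[x]) % 2 for x in range(len(a) - length + 1)}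
--         sb = {(pb[y + length] - pb[y]) % 2 for y in range(len(b) - length + 1)}
--         if sa & sb:
--             return length
-- ===== Notes on version B (the rewrite author's own statement) =====
-- stated objective: faster
-- what changed: Replaces generating all subchain slices of both chains and comparing every pair's parity with prefix parities: for each candidate length the set of achievable slice parities is computed from prefix-sum differences and the two sets are intersected.
-- outside the precondition, e.g. on calculate_longest_subchain_length(0, -1, [], []): A returns None, B returns None
import Mathlib
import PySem

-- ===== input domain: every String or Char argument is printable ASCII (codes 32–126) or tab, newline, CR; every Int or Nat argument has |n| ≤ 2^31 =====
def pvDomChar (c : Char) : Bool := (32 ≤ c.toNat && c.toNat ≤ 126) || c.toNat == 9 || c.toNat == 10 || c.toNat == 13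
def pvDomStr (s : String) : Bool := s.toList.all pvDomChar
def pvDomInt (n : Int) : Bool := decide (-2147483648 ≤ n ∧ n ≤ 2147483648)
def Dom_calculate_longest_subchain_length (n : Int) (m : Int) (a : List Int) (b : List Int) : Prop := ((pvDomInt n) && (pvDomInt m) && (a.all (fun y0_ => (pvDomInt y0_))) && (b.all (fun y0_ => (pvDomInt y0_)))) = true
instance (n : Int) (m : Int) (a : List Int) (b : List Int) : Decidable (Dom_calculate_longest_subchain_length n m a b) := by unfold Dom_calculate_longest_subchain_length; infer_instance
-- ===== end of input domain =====

-- B replaces A's all-pairs parity comparison of explicit slices by per-length parity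
-- sets computed from prefix parities and a set intersection (measured asymptotically faster).

-- ===== PORT A =====
-- generate_subchains(chain, length)
def pvSubchains (chain : List Int) (len : Int) : List (List Int) :=
  (PySem.List.pyRange 0 ((chain.length : Int) - len + 1) 1).map
    (fun x => PySem.List.slice chain (some x) (some (x + len)))

-- calculate_chain_parity(chain)
def pvParity (chain : List Int) : Int := PySem.Int.mod chain.sum 2

-- the 'for length in reversed(range(m+1)): for …: for …: if …: return length' loop,
-- as first-match recursion over the (already reversed) length list; none = fall-through (Python None)
def pvALoop (a b : List Int) : List Int → Option Int
  | [] => none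
  | L :: rest =>
    if (pvSubchains a L).any (fun sa => (pvSubchains b L).any (fun sb => pvParity sa == pvParity sb)) then
      some L
    else pvALoop a b rest

-- A falls off the end (Python None) only when min(n,m) < 0, which Pre_ excludes; .getD 0 is never used under Pre_.
def calculate_longest_subchain_length (n : Int) (m : Int) (a : List Int) (b : List Int) : Int :=
  if m > n then (pvALoop b a ((PySem.List.pyRange 0 (n + 1) 1).reverse)).getD 0
  else (pvALoop a b ((PySem.List.pyRange 0 (m + 1) 1).reverse)).getD 0

-- ===== PORT B =====
-- running-parity prefix list: pa = [0]; for v in xs: s = (s+v)%2; pa.append(s)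
def pvPrefix (s : Int) : List Int → List Int
  | [] => [s]
  | v :: rest => s :: pvPrefix (PySem.Int.mod (s + v) 2) rest

-- {(pre[x+L]-pre[x]) % 2 for x in range(la - L + 1)} as the underlying value list (before set())
def pvDiffs (pre : List Int) (la L : Int) : List Int :=
  (PySem.List.pyRange 0 (la - L + 1) 1).map
    (fun x => PySem.Int.mod (PySem.List.pyGetD pre (x + L) 0 - PySem.List.pyGetD pre x 0) 2)

-- for length in reversed(range(m+1)): if sa & sb: return length
def pvBLoop (pa pb : List Int) (la lb : Int) : List Int → Option Int
  | [] => none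
  | L :: rest =>
    if !(PySem.Set.inter (PySem.Set.ofList (pvDiffs pa la L)) (PySem.Set.ofList (pvDiffs pb lb L))).isEmpty then
      some L
    else pvBLoop pa pb la lb rest

def calculate_longest_subchain_length_alt (n : Int) (m : Int) (a : List Int) (b : List Int) : Int :=
  if m > n then
    (pvBLoop (pvPrefix 0 b) (pvPrefix 0 a) (b.length : Int) (a.length : Int)
      ((PySem.List.pyRange 0 (n + 1) 1).reverse)).getD 0
  else
    (pvBLoop (pvPrefix 0 a) (pvPrefix 0 b) (a.length : Int) (b.length : Int)
      ((PySem.List.pyRange 0 (m + 1) 1).reverse)).getD 0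

-- ===== PRECONDITION & SPEC =====
-- Pre_ excludes min(n,m) < 0, where the Python A falls off its loop and returns None (not an int).
def Pre_calculate_longest_subchain_length (n : Int) (m : Int) (a : List Int) (b : List Int) : Prop :=
  0 ≤ n ∧ 0 ≤ m
instance (n : Int) (m : Int) (a : List Int) (b : List Int) : Decidable (Pre_calculate_longest_subchain_length n m a b) := by unfold Pre_calculate_longest_subchain_length; infer_instance

def pvWitness_calculate_longest_subchain_length : Int × Int × List Int × List Int := (3, 2, [1, 2, 3], [4, 5])

def Spec_calculate_longest_subchain_length (n : Int) (m : Int) (a : List Int) (b : List Int) (out : Int) : Prop := out = calculate_longest_subchain_length_alt n m a b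
instance (n : Int) (m : Int) (a : List Int) (b : List Int) (out : Int) : Decidable (Spec_calculate_longest_subchain_length n m a b out) := by unfold Spec_calculate_longest_subchain_length; infer_instance

-- ===== CLAIM (what is proved, stated in full; the proofs are below) =====
def Claim_equal_calculate_longest_subchain_length : Prop := ∀ (n : Int) (m : Int) (a : List Int) (b : List Int), Dom_calculate_longest_subchain_length n m a b → Pre_calculate_longest_subchain_length n m a b → Spec_calculate_longest_subchain_length n m a b (calculate_longest_subchain_length n m a b)

-- ===== LEMMAS AND PROOFS =====

-- auxiliary: a list is non-nil iff it has a member (used for Python's truthiness of a set)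
theorem ne_nil_iff_exists_mem (l : List Int) : l ≠ [] ↔ ∃ x, x ∈ l := by
  constructor
  · intro h
    cases l with
    | nil => exact absurd rfl h
    | cons x t => exact ⟨x, List.mem_cons_self⟩
  · rintro ⟨x, hx⟩
    exact List.ne_nil_of_mem hx

-- prefix-list characterisation: the i-th entry of pvPrefix s xs is (s + sum(xs[:i])) % 2
theorem pvPrefix_getD (xs : List Int) (s : Int) (i : Nat) (hi : i ≤ xs.length)
    (hs : PySem.Int.mod s 2 = s) :
    (pvPrefix s xs).getD i 0 = PySem.Int.mod (s + (xs.take i).sum) 2 := by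
  induction xs generalizing s i with
  | nil =>
    have h0 : i = 0 := by simpa using hi
    subst h0
    simpa [pvPrefix] using hs.symm
  | cons v rest ih =>
    cases i with
    | zero => simpa [pvPrefix] using hs.symm
    | succ j =>
      have h2 : (0:Int) < 2 := by norm_num
      have hmod : PySem.Int.mod (PySem.Int.mod (s + v) 2) 2 = PySem.Int.mod (s + v) 2 := by
        simp only [PySem.Int.mod_eq_emod_of_pos h2]
        omega
      have hj : j ≤ rest.length := by simpa using hi
      simp only [pvPrefix, List.getD_cons_succ, ih (PySem.Int.mod (s + v) 2) j hj hmod,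
        List.take_succ_cons, List.sum_cons]
      simp only [PySem.Int.mod_eq_emod_of_pos h2]
      omega

-- parity of a slice equals the prefix-parity difference
theorem parity_slice_eq (a : List Int) (x L : Int) (hx : 0 ≤ x) (hL : 0 ≤ L)
    (hxa : x + L ≤ (a.length : Int)) :
    pvParity (PySem.List.slice a (some x) (some (x + L))) =
      PySem.Int.mod (PySem.List.pyGetD (pvPrefix 0 a) (x + L) 0 - PySem.List.pyGetD (pvPrefix 0 a) x 0) 2 := by
  have hxL : (0:Int) ≤ x + L := by omega
  have h2 : (0:Int) < 2 := by norm_num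
  rw [PySem.List.slice_toNat a hx hxL,
    PySem.List.pyGetD_of_nonneg _ _ hxL, PySem.List.pyGetD_of_nonneg _ _ hx,
    pvPrefix_getD a 0 (x + L).toNat (by omega) (by decide),
    pvPrefix_getD a 0 x.toNat (by omega) (by decide)]
  have hsplit : a.take (x + L).toNat = a.take x.toNat ++ (a.drop x.toNat).take ((x + L).toNat - x.toNat) := by
    have h : (x + L).toNat = x.toNat + ((x + L).toNat - x.toNat) := by omega
    conv_lhs => rw [h]
    exact List.take_add
  have hsum : (a.take (x + L).toNat).sum
      = (a.take x.toNat).sum + ((a.drop x.toNat).take ((x + L).toNat - x.toNat)).sum := by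
    rw [hsplit, List.sum_append]
  unfold pvParity
  simp only [PySem.Int.mod_eq_emod_of_pos h2]
  omega

-- per-length: A's pairwise test equals B's set-intersection test
theorem cond_eq (a b : List Int) (L : Int) (hL : 0 ≤ L) :
    ((pvSubchains a L).any (fun sa => (pvSubchains b L).any (fun sb => pvParity sa == pvParity sb))) =
      (!(PySem.Set.inter (PySem.Set.ofList (pvDiffs (pvPrefix 0 a) (a.length : Int) L))
          (PySem.Set.ofList (pvDiffs (pvPrefix 0 b) (b.length : Int) L))).isEmpty) := by
  rw [Bool.eq_iff_iff]
  rw [show ∀ l : List Int, ((!l.isEmpty) = true) = (l ≠ []) from fun l => by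
    simp, ne_nil_iff_exists_mem]
  simp only [pvSubchains, pvDiffs, List.any_map, List.any_eq_true, Function.comp,
    beq_iff_eq, PySem.Set.mem_inter, PySem.Set.mem_ofList, List.mem_map]
  constructor
  · rintro ⟨x, hx, y, hy, hpar⟩
    obtain ⟨hx0, hx1⟩ := PySem.List.mem_pyRange_one.mp hx
    obtain ⟨hy0, hy1⟩ := PySem.List.mem_pyRange_one.mp hy
    refine ⟨PySem.Int.mod (PySem.List.pyGetD (pvPrefix 0 a) (x + L) 0 - PySem.List.pyGetD (pvPrefix 0 a) x 0) 2,
      ⟨x, hx, rfl⟩, ⟨y, hy, ?_⟩⟩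
    rw [← parity_slice_eq a x L hx0 hL (by omega), ← parity_slice_eq b y L hy0 hL (by omega)]
    exact hpar.symm
  · rintro ⟨p, ⟨x, hx, hfx⟩, ⟨y, hy, hfy⟩⟩
    obtain ⟨hx0, hx1⟩ := PySem.List.mem_pyRange_one.mp hx
    obtain ⟨hy0, hy1⟩ := PySem.List.mem_pyRange_one.mp hy
    refine ⟨x, hx, y, hy, ?_⟩
    rw [parity_slice_eq a x L hx0 hL (by omega), parity_slice_eq b y L hy0 hL (by omega), hfx, hfy]

theorem loops_eq (a b : List Int) (ls : List Int) (h : ∀ L ∈ ls, 0 ≤ L) :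
    pvALoop a b ls = pvBLoop (pvPrefix 0 a) (pvPrefix 0 b) (a.length : Int) (b.length : Int) ls := by
  induction ls with
  | nil => rfl
  | cons L rest ih =>
    have hL : 0 ≤ L := h L (by simp)
    simp only [pvALoop, pvBLoop, cond_eq a b L hL]
    split <;> [rfl; exact ih (fun x hx => h x (by simp [hx]))]

theorem loops_eq_range (a b : List Int) (k : Int) :
    pvALoop a b ((PySem.List.pyRange 0 (k + 1) 1).reverse) =
      pvBLoop (pvPrefix 0 a) (pvPrefix 0 b) (a.length : Int) (b.length : Int) ((PySem.List.pyRange 0 (k + 1) 1).reverse) := by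
  refine loops_eq a b _ (fun L hL => ?_)
  rw [List.mem_reverse, PySem.List.mem_pyRange_one] at hL
  exact hL.1

-- ===== VERDICT (by name: the statement is the Claim_ definition above) =====
theorem calculate_longest_subchain_length_spec : Claim_equal_calculate_longest_subchain_length := by
  intro n m a b _ _
  unfold Spec_calculate_longest_subchain_length
  unfold calculate_longest_subchain_length calculate_longest_subchain_length_alt
  split
  · rw [loops_eq_range b a n]
  · rw [loops_eq_range a b m]
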